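-- pv_equiv track=rewrite | github.com/arnabs542/m0vefast | str/AbbrMatching.py | helper
-- ===== SOURCE A (Python) =====
-- def helper(source, pattern, si, pi):
--   # base case
--   if si == len(source) and pi == len(pattern):
--     return True
--   if si >= len(source) or pi >= len(pattern):   # has to be >= not >
--     return False
--
--   # t is a char
--   if pattern[pi] < '0' or pattern[pi] > '9':     # if not str.isDigit()
--     if pattern[pi] == source[si]:
--       return helper(source, pattern, si+1, pi+1)
--     else:
--       return False
--   else: # t is digit
--     count = 0
--     while pi < len(pattern) and pattern[pi] >= '0' and pattern[pi] <= '9':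
--       count = count * 10 + (ord(pattern[pi]) - ord('0'))
--       pi += 1
--     return helper(source, pattern, si+count, pi)
-- ===== SOURCE B (Python) =====
-- def helper(source, pattern, si, pi):
--     ls, lp = len(source), len(pattern)
--     if pi > lp:
--         return False
--
--     # pass 1: tokenize pattern[pi:] into literal chars and skip counts
--     tokens = []
--     while pi < lp:
--         c = pattern[pi]
--         if '0' <= c <= '9':
--             run = []
--             while pi < lp and '0' <= pattern[pi] <= '9':
--                 run.append(pattern[pi])
--                 pi += 1
--             n = 0
--             for d in run:
--                 n = n * 10 + (ord(d) - ord('0'))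
--             tokens.append(n)
--         else:
--             tokens.append(c)
--             pi += 1
--
--     # pass 2: match the token list against source starting at si
--     for t in tokens:
--         if si >= ls:
--             return False
--         if isinstance(t, int):
--             si += t
--         else:
--             if t != source[si]:
--                 return False
--             si += 1
--     return si == ls
-- ===== Notes on version B (the rewrite author's own statement) =====
-- stated objective: alternative
-- what changed: A's pointer recursion interleaving scanning and matching is replaced by a staged two-pass algorithm: first tokenize the pattern tail into a list of literal-char and skip-count tokens, then match that token list against the source in a single loop.
-- outside the precondition, e.g. on helper('a', 'abc', 5, -9): A returns False, B raises IndexError; on helper('ab', '9', -5, 0): A returns False, B returns False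
import Mathlib
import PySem

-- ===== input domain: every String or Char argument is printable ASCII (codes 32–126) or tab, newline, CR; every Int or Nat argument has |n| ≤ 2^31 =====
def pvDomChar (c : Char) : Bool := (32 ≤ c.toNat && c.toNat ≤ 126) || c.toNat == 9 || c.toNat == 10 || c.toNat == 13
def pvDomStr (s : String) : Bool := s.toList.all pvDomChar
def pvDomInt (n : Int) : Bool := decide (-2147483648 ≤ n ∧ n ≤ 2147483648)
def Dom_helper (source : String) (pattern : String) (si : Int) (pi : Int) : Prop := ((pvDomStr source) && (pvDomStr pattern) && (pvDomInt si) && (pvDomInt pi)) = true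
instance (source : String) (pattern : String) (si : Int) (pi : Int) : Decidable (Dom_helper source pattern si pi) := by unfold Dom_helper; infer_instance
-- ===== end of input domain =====

-- B replaces A's interleaved pointer recursion by a staged pass: tokenize the pattern tail
-- into literal/skip tokens once, then match the token list against the source (objective: alternative).
-- All loops are ported as structural recursions on an explicit fuel that provably covers the loop's
-- iteration count (a totality device only; it never changes a computed value).

-- ===== PORT A =====
-- inner `while` of A's digit branch: returns (count, pi) after consuming the digit run;
-- fuel (len - p).toNat is exhausted exactly when p ≥ len, where the while-condition stops anyway
def scanAGo (pat : List Char) : Nat → Int → Int → Int × Int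
  | 0, p, count => (count, p)
  | fuel + 1, p, count =>
    match PySem.List.pyGet? pat p with
    | some c =>
      if p < (pat.length : Int) ∧ '0' ≤ c ∧ c ≤ '9' then
        scanAGo pat fuel (p + 1) (count * 10 + ((c.toNat : Int) - 48))
      else (count, p)
    | none => (count, p)

def scanA (pat : List Char) (p count : Int) : Int × Int :=
  scanAGo pat ((pat.length : Int) - p).toNat p count

-- literal port of A's recursion (pattern[pi]/source[si] via pyGet?; none = Python IndexError,
-- excluded by Pre_); every call advances pi or returns, so fuel (len - pi).toNat + 1 suffices
def helperRecGo (src pat : List Char) : Nat → Int → Int → Bool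
  | 0, _, _ => false
  | fuel + 1, si, pi =>
    if si = (src.length : Int) ∧ pi = (pat.length : Int) then true
    else if si ≥ (src.length : Int) ∨ pi ≥ (pat.length : Int) then false
    else
      match PySem.List.pyGet? pat pi with
      | none => false
      | some t =>
        if t < '0' ∨ t > '9' then
          match PySem.List.pyGet? src si with
          | none => false
          | some s =>
            if t = s then helperRecGo src pat fuel (si + 1) (pi + 1) else false
        else
          helperRecGo src pat fuel (si + (scanA pat pi 0).1) (scanA pat pi 0).2

def helper (source : String) (pattern : String) (si : Int) (pi : Int) : Bool :=
  helperRecGo source.toList pattern.toList (((pattern.toList.length : Int) - pi).toNat + 1) si pi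

-- ===== PORT B =====
-- a pattern token: a literal character to match, or a count of source positions to skip
inductive PTok
  | lit : Char → PTok
  | skip : Int → PTok
deriving DecidableEq

-- B's innermost while: collect the maximal digit run of the pattern starting at p
def digitRunGo (pat : List Char) : Nat → Int → List Char
  | 0, _ => []
  | fuel + 1, p =>
    if p < (pat.length : Int) then
      match PySem.List.pyGet? pat p with
      | some c => if '0' ≤ c ∧ c ≤ '9' then c :: digitRunGo pat fuel (p + 1) else []
      | none => []
    else []

def digitRun (pat : List Char) (p : Int) : List Char :=
  digitRunGo pat ((pat.length : Int) - p).toNat p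

-- B's `for d in run` accumulation of the skip count
def runVal (run : List Char) : Int :=
  run.foldl (fun n d => n * 10 + ((d.toNat : Int) - 48)) 0

-- pass 1 of B: tokenize the pattern from position p to its end
def tokGo (pat : List Char) : Nat → Int → List PTok
  | 0, _ => []
  | fuel + 1, p =>
    if p < (pat.length : Int) then
      match PySem.List.pyGet? pat p with
      | some c =>
        if '0' ≤ c ∧ c ≤ '9' then
          PTok.skip (runVal (digitRun pat p)) :: tokGo pat fuel (p + (digitRun pat p).length)
        else PTok.lit c :: tokGo pat fuel (p + 1)
      | none => []  -- Python raises IndexError here; outside Pre_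
    else []

def tokenize (pat : List Char) (p : Int) : List PTok :=
  tokGo pat ((pat.length : Int) - p).toNat p

-- pass 2 of B: match the token list against the source starting at si
def matchToks (src : List Char) (si : Int) : List PTok → Bool
  | [] => decide (si = (src.length : Int))
  | t :: ts =>
    if si ≥ (src.length : Int) then false
    else
      match t with
      | PTok.skip n => matchToks src (si + n) ts
      | PTok.lit c =>
        match PySem.List.pyGet? src si with
        | some s => if c ≠ s then false else matchToks src (si + 1) ts
        | none => false  -- Python raises IndexError here; outside Pre_

def helper_alt (source : String) (pattern : String) (si : Int) (pi : Int) : Bool :=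
  if pi > (pattern.toList.length : Int) then false
  else matchToks source.toList si (tokenize pattern.toList pi)

-- ===== PRECONDITION & SPEC =====
-- Pre_ excludes start indices so far negative that a pattern/source access runs off the front of
-- the string and raises IndexError; A and B index in a different order, so each may raise where
-- the other still returns (see the cites), hence both regions are excluded.
def Pre_helper (source : String) (pattern : String) (si : Int) (pi : Int) : Prop :=
  (pattern.toList.length : Int) ≤ pi ∨
  (-(pattern.toList.length : Int) ≤ pi ∧
    (-(source.toList.length : Int) ≤ si ∨ (source.toList.length : Int) ≤ si))
instance (source : String) (pattern : String) (si : Int) (pi : Int) : Decidable (Pre_helper source pattern si pi) := by unfold Pre_helper; infer_instance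

def pvWitness_helper : String × String × Int × Int := ("ab", "a1", 0, 0)

def Spec_helper (source : String) (pattern : String) (si : Int) (pi : Int) (out : Bool) : Prop := out = helper_alt source pattern si pi
instance (source : String) (pattern : String) (si : Int) (pi : Int) (out : Bool) : Decidable (Spec_helper source pattern si pi out) := by unfold Spec_helper; infer_instance

-- ===== CLAIM (what is proved, stated in full; the proofs are below) =====
def Claim_equal_helper : Prop := ∀ (source : String) (pattern : String) (si : Int) (pi : Int), Dom_helper source pattern si pi → Pre_helper source pattern si pi → Spec_helper source pattern si pi (helper source pattern si pi)

-- ===== LEMMAS AND PROOFS =====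

theorem char_ge48 (c : Char) (h : '0' ≤ c) : 48 ≤ ((c.toNat : Int)) := by
  have h1 : ('0' : Char).toNat ≤ c.toNat := Nat.succ_le_of_lt h
  have h2 : ('0' : Char).toNat = 48 := by decide
  omega

theorem pyGet?_some_of_inRange (xs : List Char) (i : Int)
    (h1 : -(xs.length : Int) ≤ i) (h2 : i < (xs.length : Int)) :
    ∃ c, PySem.List.pyGet? xs i = some c := by
  cases hc : PySem.List.pyGet? xs i with
  | some c => exact ⟨c, rfl⟩
  | none =>
    rw [PySem.List.pyGet?_eq_none_iff] at hc
    simp [PySem.Raise.InRange] at hc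
    omega

-- unfolding lemmas for the B-side wrappers (the fuel passed down is again the exact one)

theorem digitRun_stop (pat : List Char) (p : Int) (h : ¬ p < (pat.length : Int)) :
    digitRun pat p = [] := by
  have h0 : ((pat.length : Int) - p).toNat = 0 := by omega
  unfold digitRun
  rw [h0]
  rfl

theorem digitRun_none (pat : List Char) (p : Int)
    (hc : PySem.List.pyGet? pat p = none) : digitRun pat p = [] := by
  by_cases h : p < (pat.length : Int)
  · have h1 : ((pat.length : Int) - p).toNat = (((pat.length : Int) - (p + 1)).toNat) + 1 := by omega
    unfold digitRun
    rw [h1]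
    simp [digitRunGo, h, hc]
  · exact digitRun_stop pat p h

theorem digitRun_nondigit (pat : List Char) (p : Int) (c : Char)
    (hc : PySem.List.pyGet? pat p = some c) (hnd : ¬ ('0' ≤ c ∧ c ≤ '9')) :
    digitRun pat p = [] := by
  by_cases h : p < (pat.length : Int)
  · have h1 : ((pat.length : Int) - p).toNat = (((pat.length : Int) - (p + 1)).toNat) + 1 := by omega
    unfold digitRun
    rw [h1]
    simp [digitRunGo, h, hc, hnd]
  · exact digitRun_stop pat p h

theorem digitRun_cons (pat : List Char) (p : Int) (h : p < (pat.length : Int))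
    (c : Char) (hc : PySem.List.pyGet? pat p = some c) (hd : '0' ≤ c ∧ c ≤ '9') :
    digitRun pat p = c :: digitRun pat (p + 1) := by
  have h1 : ((pat.length : Int) - p).toNat = (((pat.length : Int) - (p + 1)).toNat) + 1 := by omega
  unfold digitRun
  rw [h1]
  simp [digitRunGo, h, hc, hd]

-- A's digit while-loop computes exactly B's (run value, end of run) pair
theorem scanAGo_eq_run (pat : List Char) (fuel : Nat) : ∀ (p count : Int),
    ((pat.length : Int) - p).toNat = fuel →
    scanAGo pat fuel p count =
      ((digitRun pat p).foldl (fun n d => n * 10 + ((d.toNat : Int) - 48)) count,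
       p + ((digitRun pat p).length : Int)) := by
  induction fuel with
  | zero =>
    intro p count hf
    rw [digitRun_stop pat p (by omega)]
    simp [scanAGo]
  | succ fuel ih =>
    intro p count hf
    have hp : p < (pat.length : Int) := by omega
    cases hc : PySem.List.pyGet? pat p with
    | none =>
      rw [digitRun_none pat p hc]
      simp [scanAGo, hc]
    | some c =>
      by_cases hd : '0' ≤ c ∧ c ≤ '9'
      · rw [digitRun_cons pat p hp c hc hd]
        have hrec := ih (p + 1) (count * 10 + ((c.toNat : Int) - 48)) (by omega)
        simp only [scanAGo, hc, if_pos (⟨hp, hd.1, hd.2⟩ : p < (pat.length : Int) ∧ '0' ≤ c ∧ c ≤ '9')]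
        rw [hrec]
        simp only [List.foldl_cons, List.length_cons, Prod.mk.injEq]
        exact ⟨trivial, by push_cast; omega⟩
      · rw [digitRun_nondigit pat p c hc hd]
        have hnd' : ¬ (p < (pat.length : Int) ∧ '0' ≤ c ∧ c ≤ '9') := fun hh => hd ⟨hh.2.1, hh.2.2⟩
        simp [scanAGo, hc, hnd']

theorem scanA_eq_run (pat : List Char) (p count : Int) :
    scanA pat p count =
      ((digitRun pat p).foldl (fun n d => n * 10 + ((d.toNat : Int) - 48)) count,
       p + ((digitRun pat p).length : Int)) :=
  scanAGo_eq_run pat (((pat.length : Int) - p).toNat) p count rfl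

theorem scanAGo_fst_nonneg (pat : List Char) (fuel : Nat) : ∀ (p count : Int),
    0 ≤ count → 0 ≤ (scanAGo pat fuel p count).1 := by
  induction fuel with
  | zero => intro p count h; simpa [scanAGo]
  | succ fuel ih =>
    intro p count h
    cases hc : PySem.List.pyGet? pat p with
    | none => simp only [scanAGo, hc]; simpa
    | some c =>
      by_cases hcond : p < (pat.length : Int) ∧ '0' ≤ c ∧ c ≤ '9'
      · simp only [scanAGo, hc, if_pos hcond]
        exact ih (p + 1) _ (by have := char_ge48 c hcond.2.1; nlinarith)
      · simp only [scanAGo, hc, if_neg hcond]; simpa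

theorem scanA_fst_nonneg (pat : List Char) (p count : Int) (h : 0 ≤ count) :
    0 ≤ (scanA pat p count).1 :=
  scanAGo_fst_nonneg pat _ p count h

theorem digitRunGo_end_le (pat : List Char) (fuel : Nat) : ∀ (p : Int),
    p ≤ (pat.length : Int) → ((pat.length : Int) - p).toNat = fuel →
    p + ((digitRun pat p).length : Int) ≤ (pat.length : Int) := by
  induction fuel with
  | zero =>
    intro p hple hf
    rw [digitRun_stop pat p (by omega)]
    simpa
  | succ fuel ih =>
    intro p hple hf
    have hp : p < (pat.length : Int) := by omega
    cases hc : PySem.List.pyGet? pat p with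
    | none => rw [digitRun_none pat p hc]; simpa
    | some c =>
      by_cases hd : '0' ≤ c ∧ c ≤ '9'
      · rw [digitRun_cons pat p hp c hc hd]
        have := ih (p + 1) (by omega) (by omega)
        simp only [List.length_cons]
        push_cast at *
        omega
      · rw [digitRun_nondigit pat p c hc hd]; simpa

theorem digitRun_end_le (pat : List Char) (p : Int) (h : p ≤ (pat.length : Int)) :
    p + ((digitRun pat p).length : Int) ≤ (pat.length : Int) :=
  digitRunGo_end_le pat (((pat.length : Int) - p).toNat) p h rfl

-- tokGo is fuel-stable above the sufficient amount
theorem tokGo_congr (pat : List Char) (fuel : Nat) : ∀ (fuel' : Nat) (p : Int),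
    ((pat.length : Int) - p).toNat ≤ fuel → ((pat.length : Int) - p).toNat ≤ fuel' →
    tokGo pat fuel p = tokGo pat fuel' p := by
  induction fuel with
  | zero =>
    intro fuel' p h1 h2
    have hp : ¬ p < (pat.length : Int) := by omega
    cases fuel' with
    | zero => rfl
    | succ fuel' => simp [tokGo, hp]
  | succ fuel ih =>
    intro fuel' p h1 h2
    cases fuel' with
    | zero =>
      have hp : ¬ p < (pat.length : Int) := by omega
      simp [tokGo, hp]
    | succ fuel' =>
      by_cases hp : p < (pat.length : Int)
      · cases hc : PySem.List.pyGet? pat p with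
        | none => simp [tokGo, hp, hc]
        | some c =>
          by_cases hd : '0' ≤ c ∧ c ≤ '9'
          · simp only [tokGo, if_pos hp, hc, if_pos hd]
            have hcons := digitRun_cons pat p hp c hc hd
            have hlen : 1 ≤ ((digitRun pat p).length : Int) := by
              rw [hcons]; simp only [List.length_cons]; push_cast; omega
            rw [ih fuel' (p + (digitRun pat p).length) (by omega) (by omega)]
          · simp only [tokGo, if_pos hp, hc, if_neg hd]
            rw [ih fuel' (p + 1) (by omega) (by omega)]
      · simp [tokGo, hp]

-- unfolding lemmas for tokenize

theorem tokenize_nil (pat : List Char) (p : Int) (h : ¬ p < (pat.length : Int)) :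
    tokenize pat p = [] := by
  have h0 : ((pat.length : Int) - p).toNat = 0 := by omega
  unfold tokenize
  rw [h0]
  rfl

theorem tokenize_lit (pat : List Char) (p : Int) (h : p < (pat.length : Int))
    (c : Char) (hc : PySem.List.pyGet? pat p = some c) (hnd : ¬ ('0' ≤ c ∧ c ≤ '9')) :
    tokenize pat p = PTok.lit c :: tokenize pat (p + 1) := by
  have h1 : ((pat.length : Int) - p).toNat = (((pat.length : Int) - (p + 1)).toNat) + 1 := by omega
  unfold tokenize
  rw [h1]
  simp [tokGo, h, hc, hnd]

theorem tokenize_digit (pat : List Char) (p : Int) (h : p < (pat.length : Int))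
    (c : Char) (hc : PySem.List.pyGet? pat p = some c) (hd : '0' ≤ c ∧ c ≤ '9') :
    tokenize pat p = PTok.skip (runVal (digitRun pat p)) :: tokenize pat (p + (digitRun pat p).length) := by
  have h1 : ((pat.length : Int) - p).toNat = (((pat.length : Int) - (p + 1)).toNat) + 1 := by omega
  have hcons := digitRun_cons pat p h c hc hd
  have hlen : 1 ≤ ((digitRun pat p).length : Int) := by
    rw [hcons]; simp only [List.length_cons]; push_cast; omega
  unfold tokenize
  rw [h1]
  simp only [tokGo, if_pos h, hc, if_pos hd]
  rw [tokGo_congr pat (((pat.length : Int) - (p + 1)).toNat)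
        (((pat.length : Int) - (p + (digitRun pat p).length)).toNat)
        (p + (digitRun pat p).length) (by omega) (by omega)]

-- main invariant: A's recursion equals B's token matcher on the in-range states
theorem helperRecGo_eq (src pat : List Char) (fuel : Nat) : ∀ (si pi : Int),
    ((pat.length : Int) - pi).toNat < fuel →
    -(pat.length : Int) ≤ pi → pi ≤ (pat.length : Int) →
    (-(src.length : Int) ≤ si ∨ (src.length : Int) ≤ si) →
    helperRecGo src pat fuel si pi = matchToks src si (tokenize pat pi) := by
  induction fuel with
  | zero => intro si pi hf; omega
  | succ fuel ih =>
    intro si pi hf hp1 hp2 hs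
    by_cases h1 : si = (src.length : Int) ∧ pi = (pat.length : Int)
    · rw [tokenize_nil pat pi (by omega)]
      simp [helperRecGo, h1, matchToks, h1.1]
    · by_cases h2 : si ≥ (src.length : Int) ∨ pi ≥ (pat.length : Int)
      · -- one of the two bound checks fires: A returns False
        rw [helperRecGo]
        rw [if_neg h1, if_pos h2]
        by_cases hpe : (pat.length : Int) ≤ pi
        · have hpi : pi = (pat.length : Int) := le_antisymm hp2 hpe
          rw [tokenize_nil pat pi (by omega)]
          have hsne : si ≠ (src.length : Int) := fun hh => h1 ⟨hh, hpi⟩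
          simp [matchToks, hsne]
        · have hpl : pi < (pat.length : Int) := by omega
          have hsl : (src.length : Int) ≤ si := by
            rcases h2 with h | h
            · exact h
            · omega
          obtain ⟨c, hc⟩ := pyGet?_some_of_inRange pat pi hp1 hpl
          by_cases hd : '0' ≤ c ∧ c ≤ '9'
          · rw [tokenize_digit pat pi hpl c hc hd]
            simp [matchToks, hsl]
          · rw [tokenize_lit pat pi hpl c hc hd]
            simp [matchToks, hsl]
      · -- both pointers strictly inside: A reads pattern[pi]
        simp only [not_or, not_le] at h2
        obtain ⟨t, hpc⟩ := pyGet?_some_of_inRange pat pi hp1 h2.2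
        have hsge : -(src.length : Int) ≤ si := by
          rcases hs with h | h
          · exact h
          · omega
        obtain ⟨s, hsrc⟩ := pyGet?_some_of_inRange src si hsge h2.1
        have hnge : ¬ (si ≥ (src.length : Int) ∨ pi ≥ (pat.length : Int)) := by omega
        by_cases hd : t < '0' ∨ t > '9'
        · -- literal character
          have hnd : ¬ ('0' ≤ t ∧ t ≤ '9') := by
            rcases hd with h | h
            · exact fun hh => absurd hh.1 (not_le.mpr h)
            · exact fun hh => absurd hh.2 (not_le.mpr h)
          simp only [helperRecGo, if_neg h1, if_neg hnge, hpc, if_pos hd, hsrc]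
          rw [tokenize_lit pat pi h2.2 t hpc hnd]
          simp only [matchToks, if_neg (show ¬ si ≥ (src.length : Int) by omega), hsrc]
          by_cases heq : t = s
          · simp only [if_pos heq, if_neg (show ¬ (t ≠ s) by simp [heq])]
            exact ih (si + 1) (pi + 1) (by omega) (by omega) (by omega) (by omega)
          · simp only [if_neg heq, if_pos (show (t ≠ s) from heq)]
        · -- digit: A skips by the scanned count, B by the skip token
          have hdig : '0' ≤ t ∧ t ≤ '9' := by
            simp only [not_or, not_lt] at hd
            exact ⟨hd.1, hd.2⟩
          simp only [helperRecGo, if_neg h1, if_neg hnge, hpc, if_neg hd]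
          have hscan := scanA_eq_run pat pi 0
          have hn0 : 0 ≤ (scanA pat pi 0).1 := scanA_fst_nonneg pat pi 0 le_rfl
          have hend := digitRun_end_le pat pi (by omega)
          have hcons := digitRun_cons pat pi h2.2 t hpc hdig
          have hlen : 1 ≤ ((digitRun pat pi).length : Int) := by
            rw [hcons]; simp only [List.length_cons]; push_cast; omega
          have hfst : (scanA pat pi 0).1 = runVal (digitRun pat pi) := by
            rw [hscan]; rfl
          have hsnd : (scanA pat pi 0).2 = pi + ((digitRun pat pi).length : Int) := by
            rw [hscan]
          rw [tokenize_digit pat pi h2.2 t hpc hdig]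
          simp only [matchToks, if_neg (show ¬ si ≥ (src.length : Int) by omega)]
          have hib := ih (si + (scanA pat pi 0).1) (scanA pat pi 0).2
            (by rw [hsnd]; omega) (by rw [hsnd]; omega) (by rw [hsnd]; omega)
            (by rcases hs with h | h
                · exact Or.inl (by omega)
                · exact Or.inr (by omega))
          rw [hib, hfst, hsnd]

-- ===== VERDICT (by name: the statement is the Claim_ definition above) =====
theorem helper_spec : Claim_equal_helper := by
  intro source pattern si pi _ hpre
  unfold Spec_helper helper helper_alt
  by_cases hgt : pi > (pattern.toList.length : Int)
  · rw [if_pos hgt]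
    rw [helperRecGo]
    rw [if_neg (by omega), if_pos (by omega)]
  · rw [if_neg hgt]
    have hle : pi ≤ (pattern.toList.length : Int) := by omega
    rcases hpre with h | h
    · -- pi = len pattern: both sides reduce to "si = len source"
      have hpi : pi = (pattern.toList.length : Int) := le_antisymm hle h
      rw [tokenize_nil pattern.toList pi (by omega)]
      rw [helperRecGo]
      by_cases hse : si = (source.toList.length : Int)
      · rw [if_pos ⟨hse, hpi⟩]
        simp [matchToks, hse]
      · rw [if_neg (by intro hh; exact hse hh.1), if_pos (by omega)]
        simp only [matchToks]
        simpa using hse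
    · exact helperRecGo_eq source.toList pattern.toList _ si pi (by omega) h.1 hle h.2
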